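-- pv_equiv track=rewrite | github.com/Hyeon-Yeong/ML_PA | code/project_modified.py | adjust_vertical
-- ===== SOURCE A (Python) =====
-- def adjust_vertical(matrix, i, j, condition_value, adjust_i, adjust_j, is_top):
--     marker = 0
--     if (matrix[i][j] == 0 or i == condition_value) if is_top else (matrix[i][j] == 0 or i == condition_value):
--         if i != condition_value:
--             i += adjust_i
--             marker = 1
--         return i, j + 1
--     if marker == 0:
--         return adjust_vertical(matrix, i + (-1 if is_top else 1), j, condition_value, adjust_i, adjust_j, is_top)
--     return
-- ===== SOURCE B (Python) =====
-- def adjust_vertical(matrix, i, j, condition_value, adjust_i, adjust_j, is_top):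
--     step = -1 if is_top else 1
--     d = (condition_value - i) * step
--     nb = d if d >= 0 else None  # step count at which the scan would hit the boundary index, if ever
--     n = 0
--     while nb != n and matrix[i + n * step][j] != 0:
--         n += 1
--     k = i + n * step
--     if k == condition_value:
--         return k, j + 1
--     return k + adjust_i, j + 1
-- ===== Notes on version B (the rewrite author's own statement) =====
-- stated objective: alternative
-- what changed: Instead of A's tail recursion that moves the index cell by cell and re-tests the boundary each call, B computes the boundary step-count in closed form from condition_value, i and the step sign, then counts steps n in a loop that only searches for the first zero cell before that count.
import Mathlib
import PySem

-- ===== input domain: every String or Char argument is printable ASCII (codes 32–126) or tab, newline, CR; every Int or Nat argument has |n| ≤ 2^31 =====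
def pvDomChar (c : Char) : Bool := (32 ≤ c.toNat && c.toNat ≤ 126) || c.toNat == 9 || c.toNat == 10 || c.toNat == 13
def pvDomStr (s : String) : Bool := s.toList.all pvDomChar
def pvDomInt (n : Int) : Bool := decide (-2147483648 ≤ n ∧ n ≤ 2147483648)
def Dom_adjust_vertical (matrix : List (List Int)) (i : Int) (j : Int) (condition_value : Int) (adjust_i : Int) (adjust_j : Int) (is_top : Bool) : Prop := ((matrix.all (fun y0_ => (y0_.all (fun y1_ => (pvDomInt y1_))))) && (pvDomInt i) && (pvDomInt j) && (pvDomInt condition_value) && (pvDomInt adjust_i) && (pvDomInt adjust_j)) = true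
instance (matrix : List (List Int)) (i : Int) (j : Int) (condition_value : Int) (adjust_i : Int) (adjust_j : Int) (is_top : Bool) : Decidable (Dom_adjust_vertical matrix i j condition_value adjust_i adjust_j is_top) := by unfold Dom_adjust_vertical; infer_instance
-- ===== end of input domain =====

-- B replaces A's index-carrying tail recursion by a step-counting scan: it precomputes in
-- closed form the step count nb at which the scan would hit the boundary index, then searches
-- for the first zero cell among the first nb positions — an alternative decomposition, same cost.
-- Where Python A raises (IndexError / deep recursion), A's port returns none; Pre_ excludes those inputs.

-- ===== PORT A =====
-- fuel makes the recursion total; 2*|matrix|+2 bounds the number of calls whenever A returns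
-- (after the first successful access every scanned index lies in [-len, len)).
def adjustVerticalGoA (fuel : Nat) (matrix : List (List Int)) (i : Int) (j : Int) (condition_value : Int) (adjust_i : Int) (adjust_j : Int) (is_top : Bool) : Option (Int × Int) :=
  match fuel with
  | 0 => none
  | f + 1 =>
    match (PySem.List.pyGet? matrix i).bind (fun row => PySem.List.pyGet? row j) with
    | none => none        -- IndexError
    | some v =>
      let marker : Int := 0
      if (if is_top then (v = 0 ∨ i = condition_value) else (v = 0 ∨ i = condition_value)) then
        if i ≠ condition_value then some (i + adjust_i, j + 1) else some (i, j + 1)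
      else
        if marker = 0 then
          adjustVerticalGoA f matrix (i + (if is_top then -1 else 1)) j condition_value adjust_i adjust_j is_top
        else none           -- Python's dead `return None`

def adjust_vertical (matrix : List (List Int)) (i : Int) (j : Int) (condition_value : Int) (adjust_i : Int) (adjust_j : Int) (is_top : Bool) : Option (Int × Int) :=
  adjustVerticalGoA (2 * matrix.length + 2) matrix i j condition_value adjust_i adjust_j is_top

-- ===== PORT B =====
-- the while-loop of Source B: n counts steps; stop when n reaches nb (boundary) or the cell is 0
def altLoop (fuel : Nat) (matrix : List (List Int)) (j : Int) (base step : Int) (nb : Option Nat) (n : Nat) : Option Nat :=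
  match fuel with
  | 0 => none
  | f + 1 =>
    if nb = some n then some n
    else
      match (PySem.List.pyGet? matrix (base + n * step)).bind (fun row => PySem.List.pyGet? row j) with
      | none => none      -- IndexError
      | some v => if v = 0 then some n else altLoop f matrix j base step nb (n + 1)

def adjust_vertical_alt (matrix : List (List Int)) (i : Int) (j : Int) (condition_value : Int) (adjust_i : Int) (adjust_j : Int) (is_top : Bool) : Option (Int × Int) :=
  let step : Int := if is_top then -1 else 1
  let d : Int := (condition_value - i) * step
  let nb : Option Nat := if 0 ≤ d then some d.toNat else none
  match altLoop (nb.getD 0 + 2 * matrix.length + 2) matrix j i step nb 0 with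
  | none => none
  | some n =>
    let k : Int := i + n * step
    if k = condition_value then some (k, j + 1) else some (k + adjust_i, j + 1)

-- ===== PRECONDITION & SPEC =====
-- Pre_: the scan starting at i (step -1 if is_top else +1) reaches, through valid nonzero
-- non-boundary cells only, a cell that is 0 or the boundary index — exactly the inputs on
-- which Python A returns (otherwise it raises IndexError or exhausts the recursion).
def Pre_adjust_vertical (matrix : List (List Int)) (i : Int) (j : Int) (condition_value : Int) (adjust_i : Int) (adjust_j : Int) (is_top : Bool) : Prop :=
  ∃ n : Nat, n < 2 * matrix.length + 2 ∧
    (∃ v, (PySem.List.pyGet? matrix (i + n * (if is_top then -1 else 1))).bind (fun row => PySem.List.pyGet? row j) = some v ∧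
      (v = 0 ∨ i + n * (if is_top then -1 else 1) = condition_value)) ∧
    (∀ m : Nat, m < n →
      ∃ v, (PySem.List.pyGet? matrix (i + m * (if is_top then -1 else 1))).bind (fun row => PySem.List.pyGet? row j) = some v ∧
        v ≠ 0 ∧ i + m * (if is_top then -1 else 1) ≠ condition_value)
instance (matrix : List (List Int)) (i : Int) (j : Int) (condition_value : Int) (adjust_i : Int) (adjust_j : Int) (is_top : Bool) : Decidable (Pre_adjust_vertical matrix i j condition_value adjust_i adjust_j is_top) := by unfold Pre_adjust_vertical; infer_instance

def pvWitness_adjust_vertical : List (List Int) × Int × Int × Int × Int × Int × Bool := ([[1], [0]], 0, 0, 5, 1, 1, false)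

def Spec_adjust_vertical (matrix : List (List Int)) (i : Int) (j : Int) (condition_value : Int) (adjust_i : Int) (adjust_j : Int) (is_top : Bool) (out : Option (Int × Int)) : Prop := out = adjust_vertical_alt matrix i j condition_value adjust_i adjust_j is_top
instance (matrix : List (List Int)) (i : Int) (j : Int) (condition_value : Int) (adjust_i : Int) (adjust_j : Int) (is_top : Bool) (out : Option (Int × Int)) : Decidable (Spec_adjust_vertical matrix i j condition_value adjust_i adjust_j is_top out) := by unfold Spec_adjust_vertical; infer_instance

-- ===== CLAIM (what is proved, stated in full; the proofs are below) =====
def Claim_equal_adjust_vertical : Prop := ∀ (matrix : List (List Int)) (i : Int) (j : Int) (condition_value : Int) (adjust_i : Int) (adjust_j : Int) (is_top : Bool), Dom_adjust_vertical matrix i j condition_value adjust_i adjust_j is_top → Pre_adjust_vertical matrix i j condition_value adjust_i adjust_j is_top → Spec_adjust_vertical matrix i j condition_value adjust_i adjust_j is_top (adjust_vertical matrix i j condition_value adjust_i adjust_j is_top)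

-- ===== LEMMAS AND PROOFS =====
-- A's recursion, run from base i with enough fuel, returns the value at the first stop step n
theorem lemA (matrix : List (List Int)) (j condition_value adjust_i adjust_j : Int) (is_top : Bool) :
    ∀ (n fuel : Nat) (i : Int), n < fuel →
    (∃ v, (PySem.List.pyGet? matrix (i + n * (if is_top then -1 else 1))).bind (fun row => PySem.List.pyGet? row j) = some v ∧
      (v = 0 ∨ i + n * (if is_top then -1 else 1) = condition_value)) →
    (∀ m : Nat, m < n →
      ∃ v, (PySem.List.pyGet? matrix (i + m * (if is_top then -1 else 1))).bind (fun row => PySem.List.pyGet? row j) = some v ∧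
        v ≠ 0 ∧ i + m * (if is_top then -1 else 1) ≠ condition_value) →
    adjustVerticalGoA fuel matrix i j condition_value adjust_i adjust_j is_top =
      some (if i + n * (if is_top then -1 else 1) = condition_value
            then (i + n * (if is_top then -1 else 1), j + 1)
            else (i + n * (if is_top then -1 else 1) + adjust_i, j + 1)) := by
  intro n
  induction n with
  | zero =>
    intro fuel i hfuel hstop _
    obtain ⟨v, hv, hz⟩ := hstop
    cases fuel with
    | zero => omega
    | succ f =>
      simp only [Nat.cast_zero, zero_mul, add_zero] at hv hz ⊢
      simp only [adjustVerticalGoA, hv]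
      have hz' : (v = 0 ∨ i = condition_value) := hz
      cases is_top <;> simp [hz'] <;> by_cases hc : i = condition_value <;> simp [hc]
  | succ n ih =>
    intro fuel i hfuel hstop hok
    cases fuel with
    | zero => omega
    | succ f =>
      obtain ⟨v0, hv0, hnz0, hnc0⟩ := hok 0 (Nat.succ_pos n)
      simp only [Nat.cast_zero, zero_mul, add_zero] at hv0 hnz0 hnc0
      have hcond : ¬ (v0 = 0 ∨ i = condition_value) := by tauto
      have hshift : ∀ m : Nat, i + (if is_top then (-1:Int) else 1) + (m : Int) * (if is_top then (-1:Int) else 1) = i + ((m + 1 : Nat) : Int) * (if is_top then (-1:Int) else 1) := by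
        intro m; push_cast; ring
      have hstop' : (∃ v, (PySem.List.pyGet? matrix ((i + (if is_top then (-1:Int) else 1)) + (n:Int) * (if is_top then (-1:Int) else 1))).bind (fun row => PySem.List.pyGet? row j) = some v ∧
          (v = 0 ∨ (i + (if is_top then (-1:Int) else 1)) + (n:Int) * (if is_top then (-1:Int) else 1) = condition_value)) := by
        rw [hshift n]; exact hstop
      have hok' : ∀ m : Nat, m < n →
          ∃ v, (PySem.List.pyGet? matrix ((i + (if is_top then (-1:Int) else 1)) + (m:Int) * (if is_top then (-1:Int) else 1))).bind (fun row => PySem.List.pyGet? row j) = some v ∧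
            v ≠ 0 ∧ (i + (if is_top then (-1:Int) else 1)) + (m:Int) * (if is_top then (-1:Int) else 1) ≠ condition_value := by
        intro m hm; rw [hshift m]; exact hok (m+1) (by omega)
      have := ih f (i + (if is_top then (-1:Int) else 1)) (by omega) hstop' hok'
      have hres : i + (if is_top then (-1:Int) else 1) + (n:Int) * (if is_top then (-1:Int) else 1) = i + ((n+1:Nat):Int) * (if is_top then (-1:Int) else 1) := hshift n
      rw [hres] at this
      simpa [adjustVerticalGoA, hv0, hcond] using this

-- B's loop, started at counter n0 with enough fuel, returns n0 + n when n is the first stop offset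
theorem lemB (matrix : List (List Int)) (j condition_value : Int) (step : Int) (nb : Option Nat) (base : Int)
    (hnb : ∀ k : Nat, (base + k * step = condition_value) ↔ nb = some k) :
    ∀ (n fuel n0 : Nat), n < fuel →
    (∃ v, (PySem.List.pyGet? matrix (base + (n0 + n) * step)).bind (fun row => PySem.List.pyGet? row j) = some v ∧
      (v = 0 ∨ base + (n0 + n) * step = condition_value)) →
    (∀ m : Nat, n0 ≤ m → m < n0 + n →
      ∃ v, (PySem.List.pyGet? matrix (base + m * step)).bind (fun row => PySem.List.pyGet? row j) = some v ∧
        v ≠ 0 ∧ base + m * step ≠ condition_value) →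
    altLoop fuel matrix j base step nb n0 = some (n0 + n) := by
  intro n
  induction n with
  | zero =>
    intro fuel n0 hfuel hstop _
    obtain ⟨v, hv, hz⟩ := hstop
    cases fuel with
    | zero => omega
    | succ f =>
      norm_num at hv hz
      by_cases hb : nb = some n0
      · simp [altLoop, hb]
      · have hnc : base + (n0:Int) * step ≠ condition_value := fun h => hb ((hnb n0).mp h)
        have hz' : v = 0 := by tauto
        simp [altLoop, hb, hv, hz']
  | succ n ih =>
    intro fuel n0 hfuel hstop hok
    cases fuel with
    | zero => omega
    | succ f =>
      obtain ⟨v0, hv0, hnz0, hnc0⟩ := hok n0 (le_refl n0) (by omega)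
      have hb : ¬ nb = some n0 := fun h => hnc0 ((hnb n0).mpr h)
      have hstop' : (∃ v, (PySem.List.pyGet? matrix (base + ((n0+1) + n : Nat) * step)).bind (fun row => PySem.List.pyGet? row j) = some v ∧
          (v = 0 ∨ base + ((n0+1) + n : Nat) * step = condition_value)) := by
        have : (n0 + 1) + n = n0 + (n + 1) := by omega
        rw [this]; exact hstop
      have hok' : ∀ m : Nat, n0 + 1 ≤ m → m < (n0 + 1) + n →
          ∃ v, (PySem.List.pyGet? matrix (base + (m:Int) * step)).bind (fun row => PySem.List.pyGet? row j) = some v ∧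
            v ≠ 0 ∧ base + (m:Int) * step ≠ condition_value := by
        intro m h1 h2; exact hok m (by omega) (by omega)
      have := ih f (n0 + 1) (by omega) hstop' hok'
      simp only [altLoop, hv0, if_neg hb, if_neg hnz0]
      rw [this]
      congr 1
      omega

-- ===== VERDICT (by name: the statement is the Claim_ definition above) =====
theorem adjust_vertical_spec : Claim_equal_adjust_vertical := by
  intro matrix i j condition_value adjust_i adjust_j is_top _ hpre
  obtain ⟨n, hn, hstop, hok⟩ := hpre
  unfold Spec_adjust_vertical adjust_vertical adjust_vertical_alt
  set st : Int := if is_top then (-1:Int) else 1 with hst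
  set d : Int := (condition_value - i) * st with hd
  set nb : Option Nat := if 0 ≤ d then some d.toNat else none with hnbdef
  have hnb : ∀ k : Nat, (i + (k:Int) * st = condition_value) ↔ nb = some k := by
    intro k
    rw [hnbdef, hd, hst]
    cases is_top <;> simp only [Bool.false_eq_true, if_true, if_false] <;>
      split_ifs with h <;> constructor <;> intro hh <;> simp_all <;> omega
  have hA := lemA matrix j condition_value adjust_i adjust_j is_top n (2 * matrix.length + 2) i hn hstop hok
  have hB := lemB matrix j condition_value st nb i hnb n (nb.getD 0 + 2 * matrix.length + 2) 0 (by omega)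
    (by simpa using hstop) (by intro m _ hm; simpa using hok m (by omega))
  simp only [Nat.zero_add] at hB
  rw [hA]
  simp only []
  rw [← hst, ← hd, ← hnbdef, hB]
  by_cases hc : i + (n:Int) * st = condition_value <;> simp [hc]
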